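-- pv_equiv track=rewrite | github.com/tvanfossen/entropic | src/entropic/ui/headless.py | is_sensitive_tool
-- ===== SOURCE A (Python) =====
-- from typing import TYPE_CHECKING, Any
--
-- def is_sensitive_tool(name: str, arguments: dict[str, Any]) -> bool:
--     """Check if tool invocation is sensitive."""
--     sensitive_tools = {
--         "bash.execute",
--         "filesystem.write_file",
--         "filesystem.delete",
--         "git.commit",
--         "git.push",
--     }
--     if name in sensitive_tools:
--         return True
--     dangerous_patterns = ["rm ", "sudo", "chmod", "chown", "> /", "| sh"]
--     for value in arguments.values():
--         if isinstance(value, str):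
--             for pattern in dangerous_patterns:
--                 if pattern in value:
--                     return True
--     return False
-- ===== SOURCE B (Python) =====
-- _SENSITIVE_TOOLS = {
--     "bash.execute",
--     "filesystem.write_file",
--     "filesystem.delete",
--     "git.commit",
--     "git.push",
-- }
--
-- # dangerous patterns bucketed by length: at each text position we probe one
-- # fixed-length window per bucket against a hash set, instead of scanning the
-- # text once per pattern.
-- _PATS_BY_LEN = {
--     3: frozenset({"rm ", "> /"}),
--     4: frozenset({"sudo", "| sh"}),
--     5: frozenset({"chmod", "chown"}),
-- }
--
--
-- def is_sensitive_tool(name: str, arguments: dict) -> bool: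
--     """Check if tool invocation is sensitive."""
--     if name in _SENSITIVE_TOOLS:
--         return True
--     for value in arguments.values():
--         if isinstance(value, str):
--             for i in range(len(value)):
--                 for length, pats in _PATS_BY_LEN.items():
--                     if value[i:i + length] in pats:
--                         return True
--     return False
-- ===== Notes on version B (the rewrite author's own statement) =====
-- stated objective: alternative
-- what changed: B replaces A's per-pattern substring scans ('pattern in value' for each pattern) with a single positional walk over each value that probes fixed-length windows (lengths 3/4/5) against hash sets of the patterns bucketed by length, Rabin-Karp style, so the inner loop over patterns disappears.
import Mathlib
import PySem

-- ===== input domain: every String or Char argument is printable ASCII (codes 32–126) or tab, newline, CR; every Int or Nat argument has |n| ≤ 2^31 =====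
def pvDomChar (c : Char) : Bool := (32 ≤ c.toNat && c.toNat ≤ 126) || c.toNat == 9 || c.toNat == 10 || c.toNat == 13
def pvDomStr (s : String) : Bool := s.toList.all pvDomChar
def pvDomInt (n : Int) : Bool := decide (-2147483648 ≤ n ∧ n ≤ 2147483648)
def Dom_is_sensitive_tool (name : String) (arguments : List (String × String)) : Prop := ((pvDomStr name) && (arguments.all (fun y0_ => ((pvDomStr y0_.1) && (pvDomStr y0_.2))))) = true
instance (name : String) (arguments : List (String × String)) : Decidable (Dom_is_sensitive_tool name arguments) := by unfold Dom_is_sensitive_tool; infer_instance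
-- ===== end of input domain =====

-- B replaces A's per-pattern substring scans with one positional walk per value probing
-- fixed-length windows (3/4/5) against length-bucketed pattern sets (objective: alternative).

-- ===== PORT A =====
-- A's dangerous_patterns list
def pvDangerous : List String := ["rm ", "sudo", "chmod", "chown", "> /", "| sh"]

-- membership test `name in sensitive_tools` (a literal 5-element set)
def pvIsSensitiveName (name : String) : Bool :=
  name == "bash.execute" || name == "filesystem.write_file" || name == "filesystem.delete" ||
  name == "git.commit" || name == "git.push"

def is_sensitive_tool (name : String) (arguments : List (String × String)) : Bool :=
  if pvIsSensitiveName name then true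
  else
    -- for value in arguments.values(): for pattern in dangerous_patterns: if pattern in value: return True
    arguments.any (fun kv => pvDangerous.any (fun pattern => PySem.Str.isIn pattern kv.2))

-- ===== PORT B =====
-- the length buckets of _PATS_BY_LEN
def pvPats3 : List (List Char) := ["rm ".toList, "> /".toList]
def pvPats4 : List (List Char) := ["sudo".toList, "| sh".toList]
def pvPats5 : List (List Char) := ["chmod".toList, "chown".toList]

-- for i in range(len(value)): probe the windows value[i:i+3], value[i:i+4], value[i:i+5]
-- against the buckets (s.take L is exactly the slice value[i:i+L] at the current suffix)
def pvWindowScan : List Char → Bool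
  | [] => false
  | c :: cs =>
      pvPats3.contains ((c :: cs).take 3) || pvPats4.contains ((c :: cs).take 4) ||
        pvPats5.contains ((c :: cs).take 5) || pvWindowScan cs

def is_sensitive_tool_alt (name : String) (arguments : List (String × String)) : Bool :=
  if pvIsSensitiveName name then true
  else arguments.any (fun kv => pvWindowScan kv.2.toList)

-- ===== PRECONDITION & SPEC =====
def Spec_is_sensitive_tool (name : String) (arguments : List (String × String)) (out : Bool) : Prop := out = is_sensitive_tool_alt name arguments
instance (name : String) (arguments : List (String × String)) (out : Bool) : Decidable (Spec_is_sensitive_tool name arguments out) := by unfold Spec_is_sensitive_tool; infer_instance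

-- ===== CLAIM (what is proved, stated in full; the proofs are below) =====
def Claim_equal_is_sensitive_tool : Prop := ∀ (name : String) (arguments : List (String × String)), Dom_is_sensitive_tool name arguments → Spec_is_sensitive_tool name arguments (is_sensitive_tool name arguments)

-- ===== LEMMAS AND PROOFS =====

-- a fixed-length window equality s.take L = p (with p of length L) is exactly the prefix relation
theorem takeL_eq_iff_prefix (p s : List Char) (L : Nat) (h : p.length = L) :
    s.take L = p ↔ p <+: s := by
  subst h; rw [List.prefix_iff_eq_take, eq_comm]

-- at one position: the three bucket probes find a match iff some dangerous pattern is a prefix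
theorem probe_iff (s : List Char) :
    (pvPats3.contains (s.take 3) || pvPats4.contains (s.take 4) ||
      pvPats5.contains (s.take 5)) = true ↔ ∃ p ∈ pvDangerous, p.toList <+: s := by
  simp only [pvPats3, pvPats4, pvPats5, pvDangerous, List.contains_eq_mem, List.mem_cons,
    List.not_mem_nil, or_false, decide_eq_true_eq, Bool.or_eq_true, exists_eq_or_imp,
    exists_eq_left,
    takeL_eq_iff_prefix "rm ".toList s 3 (by decide),
    takeL_eq_iff_prefix "> /".toList s 3 (by decide),
    takeL_eq_iff_prefix "sudo".toList s 4 (by decide),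
    takeL_eq_iff_prefix "| sh".toList s 4 (by decide),
    takeL_eq_iff_prefix "chmod".toList s 5 (by decide),
    takeL_eq_iff_prefix "chown".toList s 5 (by decide)]
  tauto

-- the positional walk finds a match iff some dangerous pattern occurs as an infix
theorem windowScan_iff (cs : List Char) :
    pvWindowScan cs = true ↔ ∃ p ∈ pvDangerous, p.toList <:+: cs := by
  induction cs with
  | nil => simp only [pvWindowScan]; decide
  | cons c cs ih =>
      rw [pvWindowScan, Bool.or_eq_true, probe_iff, ih]
      simp only [List.infix_cons_iff]
      constructor
      · rintro (⟨p, hp, h⟩ | ⟨p, hp, h⟩) <;> exact ⟨p, hp, by tauto⟩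
      · rintro ⟨p, hp, h | h⟩
        · exact Or.inl ⟨p, hp, h⟩
        · exact Or.inr ⟨p, hp, h⟩

-- per value: A's pattern loop agrees with B's window walk
theorem pvValue_eq (v : String) :
    pvDangerous.any (fun pattern => PySem.Str.isIn pattern v) = pvWindowScan v.toList := by
  rw [Bool.eq_iff_iff, windowScan_iff]
  simp only [List.any_eq_true, PySem.Str.isIn_iff_infix]

-- ===== VERDICT (by name: the statement is the Claim_ definition above) =====
theorem is_sensitive_tool_spec : Claim_equal_is_sensitive_tool := by
  intro name arguments _
  unfold Spec_is_sensitive_tool is_sensitive_tool is_sensitive_tool_alt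
  split
  · rfl
  · simp only [pvValue_eq]
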